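-- pv_equiv track=rewrite | github.com/jaeyo03/CodingTest | String/PCCP_mock1_1.py | solution
-- ===== SOURCE A (Python) =====
-- def solution(input_string):
--     answer = ''
--     answer_arr = []
--     answer_dic = {}
--     for i in range(len(input_string)):
--         s = input_string[i]
--         if s not in answer_dic.keys():
--             answer_dic[s] = []
--
--         answer_dic[s].append(i)
--
--     for key in answer_dic.keys():
--         arr = answer_dic[key]
--         if len(arr) >= 2:
--             for i in range(len(arr) - 1):
--                 if arr[i] + 1 != arr[i + 1]:
--                     answer_arr.append(key)
--                     break
--
--     if answer_arr == []:
--         answer_arr.append("N")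
--
--     answer_arr.sort()
--     answer = "".join(answer_arr)
--     return answer
-- ===== SOURCE B (Python) =====
-- def solution(input_string):
--     seen = set()
--     answer = set()
--     prev = None
--     for c in input_string:
--         if c != prev:
--             if c in seen:
--                 answer.add(c)
--             else:
--                 seen.add(c)
--         prev = c
--     if not answer:
--         return "N"
--     return "".join(sorted(answer))
-- ===== Notes on version B (the rewrite author's own statement) =====
-- stated objective: simpler
-- what changed: Replaced A's char->position-list dict plus a second adjacent-gap scan over every position list by a single forward pass that detects run starts via the previous character and collects chars whose second run starts, then sorts.
import Mathlib
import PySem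

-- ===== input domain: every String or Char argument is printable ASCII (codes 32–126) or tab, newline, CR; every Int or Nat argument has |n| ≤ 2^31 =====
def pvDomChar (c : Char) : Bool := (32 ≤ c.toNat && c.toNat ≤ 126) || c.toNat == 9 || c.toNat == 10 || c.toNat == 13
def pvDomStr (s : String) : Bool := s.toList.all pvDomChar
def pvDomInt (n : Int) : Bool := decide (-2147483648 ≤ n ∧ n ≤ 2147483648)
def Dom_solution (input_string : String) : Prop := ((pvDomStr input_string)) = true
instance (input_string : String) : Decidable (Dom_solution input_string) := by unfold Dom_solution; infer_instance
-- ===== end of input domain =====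

-- B replaces A's position-list dict and gap scan by a single run-boundary pass; objective: simpler.

-- ===== PORT A =====
-- inner 'for i in range(len(arr)-1): if arr[i]+1 != arr[i+1]: append; break' — true iff some adjacent pair has a gap
def aGap : List Int → Bool
  | a :: b :: t => if a + 1 ≠ b then true else aGap (b :: t)
  | _ => false

def solution (input_string : String) : String :=
  let cs := input_string.toList
  -- 'if s not in dic: dic[s] = []; dic[s].append(i)' is exactly dic[s] = dic.get(s, []) + [i] (Dict.modify)
  let d := (PySem.List.enumerate cs).foldl (fun d p => d.modify p.2 [] (· ++ [p.1])) PySem.Dict.empty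
  let answer_arr := d.items.foldl
    (fun acc p => if 2 ≤ p.2.length ∧ aGap p.2 = true then acc ++ [p.1] else acc) ([] : List Char)
  let answer_arr := if answer_arr = [] then answer_arr ++ ['N'] else answer_arr
  String.mk (PySem.List.sorted answer_arr (fun x => x) false)

-- ===== PORT B =====
def solution_alt (input_string : String) : String :=
  let st := input_string.toList.foldl
    (fun (st : PySem.Set Char × PySem.Set Char × Option Char) c =>
      if some c ≠ st.2.2 then
        (if PySem.Set.contains st.1 c then (st.1, PySem.Set.add st.2.1 c, some c)
         else (PySem.Set.add st.1 c, st.2.1, some c))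
      else (st.1, st.2.1, some c))
    ((PySem.Set.empty, PySem.Set.empty, none) : PySem.Set Char × PySem.Set Char × Option Char)
  if st.2.1 = [] then "N"
  else String.mk (PySem.List.sorted st.2.1 (fun x => x) false)

-- ===== PRECONDITION & SPEC =====
def Spec_solution (input_string : String) (out : String) : Prop := out = solution_alt input_string
instance (input_string : String) (out : String) : Decidable (Spec_solution input_string out) := by unfold Spec_solution; infer_instance

-- ===== CLAIM (what is proved, stated in full; the proofs are below) =====
def Claim_equal_solution : Prop := ∀ (input_string : String), Dom_solution input_string → Spec_solution input_string (solution input_string)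

-- ===== LEMMAS AND PROOFS =====

-- number of runs of char c in a list, b = "previous char was c"
def nruns (c : Char) : Bool → List Char → Nat
  | _, [] => 0
  | b, x :: t => if x = c then (if b then 0 else 1) + nruns c true t else nruns c false t

-- positions (from offset i) where c occurs
def posI (c : Char) : List Char → Int → List Int
  | [], _ => []
  | x :: t, i => if x = c then i :: posI c t (i + 1) else posI c t (i + 1)

def runsCont (p : Int) : List Int → Nat
  | [] => 0
  | a :: t => (if p + 1 = a then 0 else 1) + runsCont a t

def runsOf : List Int → Nat
  | [] => 0
  | a :: t => 1 + runsCont a t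

theorem aGap_eq (t : List Int) : ∀ a, aGap (a :: t) = decide (1 ≤ runsCont a t) := by
  induction t with
  | nil => intro a; simp [aGap, runsCont]
  | cons b t ih =>
    intro a
    by_cases h : a + 1 = b <;> simp [aGap, runsCont, h, ih b]

theorem posI_runs (c : Char) (t : List Char) :
    ∀ i : Int, runsOf (posI c t i) = nruns c false t ∧
      (∀ p : Int, p + 1 < i → runsCont p (posI c t i) = nruns c false t) ∧
      runsCont i (posI c t (i + 1)) = nruns c true t := by
  induction t with
  | nil => intro i; simp [posI, runsOf, runsCont, nruns]
  | cons x t ih =>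
    intro i
    by_cases hx : x = c
    · refine ⟨?_, ?_, ?_⟩
      · simp only [posI, hx, runsOf, nruns, if_true]
        rw [(ih i).2.2]; simp
      · intro p hp
        simp only [posI, hx, runsCont, nruns, if_true]
        rw [if_neg (by omega), (ih i).2.2]
        simp
      · simp only [posI, hx, runsCont, nruns, if_true]
        rw [(ih (i + 1)).2.2]
    · refine ⟨?_, ?_, ?_⟩
      · simp only [posI, hx, nruns, if_false]
        rw [(ih (i + 1)).1]
      · intro p hp
        simp only [posI, hx, nruns, if_false]
        rw [(ih (i + 1)).2.1 p (by omega)]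
      · simp only [posI, hx, nruns, if_false]
        rw [show i + 1 + 1 = (i + 1) + 1 from rfl]
        rw [(ih (i + 1 + 1)).2.1 i (by omega)]

-- A's qualification condition, in terms of run counts
theorem qual_iff (l : List Int) :
    (2 ≤ l.length ∧ aGap l = true) ↔ 2 ≤ runsOf l := by
  cases l with
  | nil => simp [runsOf]
  | cons a t =>
    cases t with
    | nil => simp [aGap, runsOf, runsCont]
    | cons b t =>
      rw [aGap_eq]
      simp only [runsOf, List.length_cons]
      constructor
      · rintro ⟨-, h⟩; simp at h; omega
      · intro h; refine ⟨by omega, by simp; omega⟩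

theorem enum_filter_posI (c : Char) (t : List Char) :
    ∀ s : Int, ((PySem.List.enumerate t s).filter (fun p => p.2 == c)).map (·.1) = posI c t s := by
  induction t with
  | nil => intro s; simp [PySem.List.enumerate_nil, posI]
  | cons x t ih =>
    intro s
    by_cases hx : x = c <;>
      simp [PySem.List.enumerate_cons, posI, hx, ih]

theorem nruns_pos_mem (c : Char) : ∀ (t : List Char) (b : Bool), 1 ≤ nruns c b t → c ∈ t := by
  intro t
  induction t with
  | nil => intro b h; simp [nruns] at h
  | cons x t ih =>
    intro b h
    by_cases hx : x = c
    · simp [hx]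
    · simp only [nruns, if_neg hx] at h
      exact List.mem_cons_of_mem _ (ih false h)

-- B's loop body, named for the proofs (definitionally the lambda in solution_alt)
def stepB (st : PySem.Set Char × PySem.Set Char × Option Char) (c : Char) :
    PySem.Set Char × PySem.Set Char × Option Char :=
  if some c ≠ st.2.2 then
    (if PySem.Set.contains st.1 c then (st.1, PySem.Set.add st.2.1 c, some c)
     else (PySem.Set.add st.1 c, st.2.1, some c))
  else (st.1, st.2.1, some c)

theorem B_mem (c : Char) : ∀ (t : List Char) (seen answer : List Char) (prev : Option Char),
    (c ∈ (t.foldl stepB (seen, answer, prev)).2.1 ↔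
      c ∈ answer ∨ (c ∈ seen ∧ 1 ≤ nruns c (decide (prev = some c)) t) ∨
        2 ≤ nruns c (decide (prev = some c)) t) := by
  intro t
  induction t with
  | nil =>
    intro seen answer prev
    simp [nruns]
  | cons x t ih =>
    intro seen answer prev
    rw [List.foldl_cons]
    by_cases hxc : x = c
    · subst hxc
      have e1 : (decide (some x = some x)) = true := by simp
      by_cases hp : some x = prev
      · have hb0 : decide (prev = some x) = true := by simp [← hp]
        have e2 : nruns x (decide (prev = some x)) (x :: t) = nruns x true t := by
          simp [nruns, hb0]
        rw [show stepB (seen, answer, prev) x = (seen, answer, some x) by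
          simp [stepB, hp], ih, e1, e2]
      · have hb0 : decide (prev = some x) = false := by
          simp; exact fun h => hp h.symm
        have e2 : nruns x (decide (prev = some x)) (x :: t) = 1 + nruns x true t := by
          simp [nruns, hb0]
        rw [show stepB (seen, answer, prev) x =
            (if PySem.Set.contains seen x then (seen, PySem.Set.add answer x, some x)
             else (PySem.Set.add seen x, answer, some x)) by simp [stepB, hp]]
        by_cases hs : PySem.Set.contains seen x = true
        · have hc : x ∈ seen := (PySem.Set.contains_iff seen x).mp hs
          rw [if_pos hs, ih, e1, e2]
          have e3 : x ∈ PySem.Set.add answer x := by simp [PySem.Set.mem_add]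
          constructor
          · intro _; exact Or.inr (Or.inl ⟨hc, by omega⟩)
          · intro _; exact Or.inl e3
        · have hc : x ∉ seen := fun h => hs ((PySem.Set.contains_iff seen x).mpr h)
          rw [if_neg hs, ih, e1, e2]
          have e3 : x ∈ PySem.Set.add seen x := by simp [PySem.Set.mem_add]
          constructor
          · rintro (h | ⟨_, hn⟩ | hn)
            · exact Or.inl h
            · exact Or.inr (Or.inr (by omega))
            · exact Or.inr (Or.inr (by omega))
          · rintro (h | ⟨hs2, _⟩ | hn)
            · exact Or.inl h
            · exact absurd hs2 hc
            · exact Or.inr (Or.inl ⟨e3, by omega⟩)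
    · have hcx : ¬ c = x := fun h => hxc h.symm
      have hflag : decide (some x = some c) = false := by simp [hxc]
      have e2 : ∀ b, nruns c b (x :: t) = nruns c false t := by
        intro b; simp [nruns, hxc]
      by_cases hp : some x = prev
      · rw [show stepB (seen, answer, prev) x = (seen, answer, some x) by
          simp [stepB, hp], ih, hflag, e2]
      · rw [show stepB (seen, answer, prev) x =
            (if PySem.Set.contains seen x then (seen, PySem.Set.add answer x, some x)
             else (PySem.Set.add seen x, answer, some x)) by simp [stepB, hp]]
        by_cases hs : PySem.Set.contains seen x = true
        · rw [if_pos hs, ih, hflag, e2]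
          simp [PySem.Set.mem_add, hcx]
        · rw [if_neg hs, ih, hflag, e2]
          simp [PySem.Set.mem_add, hcx]

theorem B_nodup : ∀ (t : List Char) (seen answer : List Char) (prev : Option Char),
    answer.Nodup → ((t.foldl stepB (seen, answer, prev)).2.1).Nodup := by
  intro t
  induction t with
  | nil => intro _ _ _ h; exact h
  | cons x t ih =>
    intro seen answer prev h
    rw [List.foldl_cons]
    by_cases hp : some x = prev
    · rw [show stepB (seen, answer, prev) x = (seen, answer, some x) by simp [stepB, hp]]
      exact ih _ _ _ h
    · rw [show stepB (seen, answer, prev) x =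
          (if PySem.Set.contains seen x then (seen, PySem.Set.add answer x, some x)
           else (PySem.Set.add seen x, answer, some x)) by simp [stepB, hp]]
      by_cases hs : PySem.Set.contains seen x = true
      · rw [if_pos hs]
        exact ih _ _ _ (PySem.Set.nodup_add answer x h)
      · rw [if_neg hs]
        exact ih _ _ _ h

theorem collect_eq (l : List (Char × List Int)) : ∀ acc : List Char,
    l.foldl (fun acc p => if 2 ≤ p.2.length ∧ aGap p.2 = true then acc ++ [p.1] else acc) acc
      = acc ++ (l.filter (fun p => decide (2 ≤ p.2.length ∧ aGap p.2 = true))).map (·.1) := by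
  induction l with
  | nil => intro acc; simp
  | cons p l ih =>
    intro acc
    by_cases h : 2 ≤ p.2.length ∧ aGap p.2 = true <;>
      simp [h, ih]

-- A's answer_arr, characterised: the distinct chars of cs with at least two runs
theorem A_arr (cs : List Char) :
    ((((PySem.List.enumerate cs).foldl
        (fun d p => d.modify p.2 [] (· ++ [p.1])) PySem.Dict.empty).items).foldl
      (fun acc p => if 2 ≤ p.2.length ∧ aGap p.2 = true then acc ++ [p.1] else acc)
      ([] : List Char))
    = (PySem.Set.ofList cs).filter (fun k => decide (2 ≤ nruns k false cs)) := by
  have hswap : (PySem.List.enumerate cs).foldl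
      (fun d p => d.modify p.2 [] (· ++ [p.1])) PySem.Dict.empty
      = ((PySem.List.enumerate cs).map (fun p => (p.2, p.1))).foldl
          (fun d q => d.modify q.1 [] (· ++ [q.2])) PySem.Dict.empty :=
    (List.foldl_map (f := fun p => (p.2, p.1))
      (g := fun d q => d.modify q.1 [] (· ++ [q.2]))
      (l := PySem.List.enumerate cs) (init := PySem.Dict.empty)).symm
  have hgetD : ∀ k, ((PySem.List.enumerate cs).foldl
      (fun d p => d.modify p.2 [] (· ++ [p.1])) PySem.Dict.empty).getD k [] = posI k cs 0 := by
    intro k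
    rw [hswap, PySem.Dict.getD_foldl_modify_append]
    rw [← enum_filter_posI k cs 0]
    simp [List.filter_map, List.map_map, Function.comp_def, PySem.Dict.getD_empty]
  have hkeys : ((PySem.List.enumerate cs).foldl
      (fun d p => d.modify p.2 [] (· ++ [p.1])) PySem.Dict.empty).keys = PySem.Set.ofList cs := by
    have h := PySem.Dict.keys_foldl_modify_key (PySem.List.enumerate cs)
      (fun p => p.2) ([] : List Int) (fun _ p => (· ++ [p.1])) PySem.Dict.empty
    simpa [PySem.List.map_snd_enumerate, PySem.Set.update_nil_left] using h
  have hnodup : ((PySem.List.enumerate cs).foldl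
      (fun d p => d.modify p.2 [] (· ++ [p.1])) PySem.Dict.empty).keys.Nodup := by
    rw [hkeys]; exact PySem.Set.nodup_ofList cs
  rw [collect_eq, PySem.Dict.items_eq_map_keys _ hnodup [], List.filter_map, List.map_map]
  have hpq : ∀ k ∈ ((PySem.List.enumerate cs).foldl
      (fun d p => d.modify p.2 [] (· ++ [p.1])) PySem.Dict.empty).keys,
      ((fun p : Char × List Int => decide (2 ≤ p.2.length ∧ aGap p.2 = true)) ∘
        (fun k => (k, ((PySem.List.enumerate cs).foldl
          (fun d p => d.modify p.2 [] (· ++ [p.1])) PySem.Dict.empty).getD k []))) k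
        = decide (2 ≤ nruns k false cs) := by
    intro k _
    simp only [Function.comp_def]
    rw [hgetD k, decide_eq_decide, qual_iff, (posI_runs k cs 0).1]
  rw [List.filter_congr hpq, hkeys]
  simp [Function.comp_def]

-- ===== VERDICT (by name: the statement is the Claim_ definition above) =====
theorem solution_spec : Claim_equal_solution := by
  intro s _
  unfold Spec_solution
  simp only [solution, solution_alt]
  rw [show (fun (st : PySem.Set Char × PySem.Set Char × Option Char) c =>
      if some c ≠ st.2.2 then
        (if PySem.Set.contains st.1 c then (st.1, PySem.Set.add st.2.1 c, some c)
         else (PySem.Set.add st.1 c, st.2.1, some c))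
      else (st.1, st.2.1, some c)) = stepB from rfl]
  set cs := s.toList with hcs
  rw [A_arr cs]
  set A := (PySem.Set.ofList cs).filter (fun k => decide (2 ≤ nruns k false cs)) with hA
  set B := (cs.foldl stepB ((PySem.Set.empty, PySem.Set.empty, none) :
      PySem.Set Char × PySem.Set Char × Option Char)).2.1 with hB
  have hmem : ∀ c, c ∈ A ↔ c ∈ B := by
    intro c
    rw [hA, hB]
    rw [show ((PySem.Set.empty, PySem.Set.empty, none) :
        PySem.Set Char × PySem.Set Char × Option Char)
        = (([] : List Char), ([] : List Char), (none : Option Char)) from rfl]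
    rw [B_mem]
    simp only [List.mem_filter, PySem.Set.mem_ofList, List.not_mem_nil, false_or,
      false_and, decide_eq_true_eq]
    constructor
    · rintro ⟨_, h⟩; simpa using h
    · intro h
      simp at h
      exact ⟨nruns_pos_mem c cs false (by omega), by simpa using h⟩
  have hperm : A.Perm B := by
    rw [List.perm_ext_iff_of_nodup]
    · exact hmem
    · exact (PySem.Set.nodup_ofList cs).filter _
    · exact B_nodup cs [] [] none List.nodup_nil
  by_cases hBe : B = []
  · have hAe : A = [] := (hBe ▸ hperm).eq_nil
    rw [if_pos hBe, if_pos hAe, hAe]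
    rfl
  · have hAe : A ≠ [] := fun h => hBe ((h ▸ hperm.symm).eq_nil)
    rw [if_neg hBe, if_neg hAe]
    rw [PySem.List.sorted_eq_sorted_of_perm A B (fun x => x) (fun _ _ h => h) hperm]
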